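-- pv_equiv track=rewrite | github.com/JoJjjo174/aoc2025 | 4/main.py | get_accessable_paper_p2
-- ===== SOURCE A (Python) =====
-- def get_accessable_paper(diagram):
--
--     accessable_locations = []
--     accessable = 0
--
--     for row_i, row in enumerate(diagram):
--         for column_i, _ in enumerate(row):
--
--             adjecant = 0
--
--             for delta_x in [-1, 0, 1]:
--                 for delta_y in [-1, 0, 1]:
--                     if delta_x == 0 and delta_y == 0:
--                         continue
--
--                     x = row_i + delta_x
--                     y = column_i + delta_y
--
--                     if x > len(diagram)-1 or x < 0 or y > len(row)-1 or y < 0: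
--                         continue
--
--                     if diagram[x][y] == "@":
--                         adjecant += 1
--
--             if adjecant < 4 and row[column_i] == "@":
--                 accessable_locations.append((row_i, column_i))
--                 accessable += 1
--
--     return accessable, accessable_locations
--
-- def get_accessable_paper_p2(diagram):
--
--     total_accessable = 0
--     current_diagram = diagram
--
--     while True:
--         amount, locations = get_accessable_paper(current_diagram)
--
--         if amount == 0:
--             break
--         total_accessable += amount
--
--         current_diagram = remove_locations(current_diagram, locations)
--
--     return total_accessable
--
-- def remove_locations(diagram, locations):
--     new_diagram = []
--
--     for row_i, row in enumerate(diagram):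
--         new_row = row
--         for col_i, col in enumerate(row):
--
--
--             loc = (row_i, col_i)
--             if loc in locations:
--                 new_row = new_row[:col_i] + "." + new_row[col_i+1:]
--
--         new_diagram.append(new_row)
--
--     return new_diagram
-- ===== SOURCE B (Python) =====
-- def get_accessable_paper_p2(diagram):
--     # Peel a set of '@' coordinates instead of rebuilding rows of strings:
--     # each round, points with fewer than 4 '@' neighbours leave the set.
--     width = len(diagram[0]) if diagram else 0
--     points = {(i, j) for i, row in enumerate(diagram)
--                      for j in range(width) if row[j] == "@"}
--     deltas = [(dx, dy) for dx in (-1, 0, 1) for dy in (-1, 0, 1)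
--               if (dx, dy) != (0, 0)]
--     total = 0
--     while True:
--         removed = [p for p in points
--                    if sum((p[0] + dx, p[1] + dy) in points
--                           for dx, dy in deltas) < 4]
--         if not removed:
--             return total
--         total += len(removed)
--         points.difference_update(removed)
-- ===== Notes on version B (the rewrite author's own statement) =====
-- stated objective: faster
-- what changed: B peels a set of '@' coordinates (per round: filter the point set by its 8-neighbour count and subtract the removed points) instead of A's per-round full-grid rescan with an O(|locations|) list-membership test and string re-slicing per cell.
import Mathlib
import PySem

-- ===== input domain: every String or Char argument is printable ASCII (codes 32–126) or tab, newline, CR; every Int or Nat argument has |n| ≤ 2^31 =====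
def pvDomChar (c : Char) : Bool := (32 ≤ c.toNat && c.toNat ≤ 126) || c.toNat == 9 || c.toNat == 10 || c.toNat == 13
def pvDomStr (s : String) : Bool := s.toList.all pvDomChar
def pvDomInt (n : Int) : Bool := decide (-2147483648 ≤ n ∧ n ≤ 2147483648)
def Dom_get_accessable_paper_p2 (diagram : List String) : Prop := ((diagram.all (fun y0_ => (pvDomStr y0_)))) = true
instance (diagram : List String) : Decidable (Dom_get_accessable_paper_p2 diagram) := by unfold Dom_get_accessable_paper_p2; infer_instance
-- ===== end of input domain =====

-- B replaces A's per-round full-grid rescan + string rebuilding by peeling a set of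
-- '@' coordinates (objective: faster — no O(|locations|) list-membership scan and no
-- string slicing inside the per-cell loops).

-- ===== PORT A =====
-- diagram[x][y] (both indices already guarded non-negative and in range by A's bounds test)
def pvCharAt (diagram : List String) (x y : Int) : Option Char :=
  ((PySem.List.pyGet? diagram x).map String.toList).bind (fun r => PySem.List.pyGet? r y)

-- the two inner delta loops of get_accessable_paper computing `adjecant`
def pvAdj (diagram : List String) (rowLen : Int) (row_i column_i : Int) : Int :=
  [(-1 : Int), 0, 1].foldl (fun a dx =>
    [(-1 : Int), 0, 1].foldl (fun a dy =>
      if dx = 0 ∧ dy = 0 then a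
      else
        let x := row_i + dx
        let y := column_i + dy
        if x > (diagram.length : Int) - 1 ∨ x < 0 ∨ y > rowLen - 1 ∨ y < 0 then a
        else if pvCharAt diagram x y = some '@' then a + 1 else a) a) 0

-- get_accessable_paper: returns (accessable, accessable_locations)
def pvGap (diagram : List String) : Int × List (Int × Int) :=
  (PySem.List.enumerate diagram).foldl (fun acc p =>
    (PySem.List.enumerate p.2.toList).foldl (fun acc2 q =>
      if pvAdj diagram (PySem.Str.len p.2) p.1 q.1 < 4 ∧
         PySem.List.pyGet? p.2.toList q.1 = some '@'
      then (acc2.1 + 1, acc2.2 ++ [(p.1, q.1)])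
      else acc2) acc) (0, [])

-- remove_locations
def pvRemove (diagram : List String) (locations : List (Int × Int)) : List String :=
  (PySem.List.enumerate diagram).foldl (fun nd p =>
    let newRow := (PySem.List.enumerate p.2.toList).foldl (fun nr q =>
      if (p.1, q.1) ∈ locations
      then PySem.List.slice nr none (some q.1) ++ ['.'] ++
           PySem.List.slice nr (some (q.1 + 1)) none
      else nr) p.2.toList
    nd ++ [String.ofList newRow]) []

-- the `while True` loop; fuel (total cell count + 1) only makes the recursion structural
def pvLoopA : Nat → List String → Int → Int
  | 0, _, total => total
  | fuel + 1, cur, total =>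
    let r := pvGap cur
    if r.1 = 0 then total
    else pvLoopA fuel (pvRemove cur r.2) (total + r.1)

def get_accessable_paper_p2 (diagram : List String) : Int :=
  pvLoopA ((diagram.map (fun s => s.toList.length)).sum + 1) diagram 0

-- ===== PORT B =====
-- width = len(diagram[0]) if diagram else 0
def pvWidth (diagram : List String) : Int :=
  match diagram with
  | [] => 0
  | r :: _ => PySem.Str.len r

-- {(i, j) for i, row in enumerate(diagram) for j in range(width) if row[j] == "@"}
def pvPoints (diagram : List String) : PySem.Set (Int × Int) :=
  PySem.Set.ofList ((PySem.List.enumerate diagram).flatMap (fun p =>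
    (PySem.List.pyRange 0 (pvWidth diagram) 1).filterMap (fun j =>
      if PySem.List.pyGet? p.2.toList j = some '@' then some (p.1, j) else none)))

def pvDeltas : List (Int × Int) :=
  [(-1 : Int), 0, 1].flatMap (fun dx =>
    [(-1 : Int), 0, 1].filterMap (fun dy =>
      if (dx, dy) = ((0 : Int), (0 : Int)) then none else some (dx, dy)))

-- sum(... in points for dx, dy in deltas)
def pvNb (points : List (Int × Int)) (p : Int × Int) : Int :=
  (pvDeltas.map (fun d =>
    if PySem.Set.contains points (p.1 + d.1, p.2 + d.2) then (1 : Int) else 0)).sum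

-- the `while True` loop; fuel (total cell count + 1) only makes the recursion structural
def pvLoopB : Nat → PySem.Set (Int × Int) → Int → Int
  | 0, _, total => total
  | fuel + 1, points, total =>
    let removed := points.filter (fun p => pvNb points p < 4)
    if removed = [] then total
    else pvLoopB fuel (PySem.Set.diff points removed) (total + removed.length)

def get_accessable_paper_p2_alt (diagram : List String) : Int :=
  pvLoopB ((diagram.map (fun s => s.toList.length)).sum + 1) (pvPoints diagram) 0

-- ===== PRECONDITION & SPEC =====
-- Pre_: all rows have equal length (a rectangular grid). This is exactly where the
-- Python A returns: on any grid with ≥ 2 rows of differing lengths A raises IndexError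
-- (it reads diagram[x][y] of a neighbouring row bounded only by the current row's length).
def Pre_get_accessable_paper_p2 (diagram : List String) : Prop :=
  ∀ r ∈ diagram, ∀ s ∈ diagram, PySem.Str.len r = PySem.Str.len s
instance (diagram : List String) : Decidable (Pre_get_accessable_paper_p2 diagram) := by
  unfold Pre_get_accessable_paper_p2; infer_instance
def pvWitness_get_accessable_paper_p2 : List String := ["@@", ".@", "@."]

def Spec_get_accessable_paper_p2 (diagram : List String) (out : Int) : Prop :=
  out = get_accessable_paper_p2_alt diagram
instance (diagram : List String) (out : Int) : Decidable (Spec_get_accessable_paper_p2 diagram out) := by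
  unfold Spec_get_accessable_paper_p2; infer_instance

-- ===== CLAIM (what is proved, stated in full; the proofs are below) =====
def Claim_equal_get_accessable_paper_p2 : Prop := ∀ (diagram : List String), Dom_get_accessable_paper_p2 diagram → Pre_get_accessable_paper_p2 diagram → Spec_get_accessable_paper_p2 diagram (get_accessable_paper_p2 diagram)
-- ===== LEMMAS AND PROOFS =====

-- the selector of B's set comprehension, for one row with index i
def pvSel (i : Int) : Int × Char → Option (Int × Int) :=
  fun q => if q.2 = '@' then some (i, q.1) else none

-- the '@'-coordinate list of a diagram, in enumeration order (pvPoints before dedup)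
def pvCells (diagram : List String) : List (Int × Int) :=
  (PySem.List.enumerate diagram).flatMap (fun p =>
    (PySem.List.enumerate p.2.toList).filterMap (pvSel p.1))

-- rectangularity, on the toList side
def pvRect (d : List String) : Prop := ∀ r ∈ d, ∀ s ∈ d, r.toList.length = s.toList.length

theorem pvSel_first {i : Int} {row : List Char} {s : Int} {p : Int × Int}
    (h : p ∈ (PySem.List.enumerate row s).filterMap (pvSel i)) : p.1 = i := by
  rcases List.mem_filterMap.1 h with ⟨q, _, hq⟩
  unfold pvSel at hq
  by_cases h' : q.2 = '@' <;> simp [h'] at hq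
  exact (congrArg Prod.fst hq.symm)

theorem pvInner_nodup (i : Int) (row : List Char) (s : Int) :
    ((PySem.List.enumerate row s).filterMap (pvSel i)).Nodup := by
  refine List.pairwise_filterMap.2 ?_
  refine (PySem.List.pairwise_lt_enumerate row s).imp ?_
  rintro a b hab x hx y hy
  unfold pvSel at hx hy
  by_cases ha : a.2 = '@' <;> simp [ha] at hx
  by_cases hb : b.2 = '@' <;> simp [hb] at hy
  rw [← hx, ← hy]
  intro hcon
  have := congrArg Prod.snd hcon
  simp at this
  omega

theorem pvFlat_aux (d : List String) : ∀ (s : Int),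
    ((PySem.List.enumerate d s).flatMap (fun p =>
      (PySem.List.enumerate p.2.toList).filterMap (pvSel p.1))).Nodup ∧
    ∀ p ∈ (PySem.List.enumerate d s).flatMap (fun p =>
      (PySem.List.enumerate p.2.toList).filterMap (pvSel p.1)), s ≤ p.1 := by
  induction d with
  | nil => intro s; simp [PySem.List.enumerate]
  | cons r t ih =>
    intro s
    rw [PySem.List.enumerate_cons]
    simp only [List.flatMap_cons]
    obtain ⟨ihn, ihb⟩ := ih (s + 1)
    constructor
    · refine (pvInner_nodup s r.toList 0).append ihn ?_
      refine List.disjoint_left.2 ?_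
      intro a ha hmem
      have h1 := pvSel_first ha
      have h2 := ihb a hmem
      omega
    · intro p hp
      rcases List.mem_append.1 hp with h | h
      · exact le_of_eq (pvSel_first h).symm
      · have := ihb p h; omega

theorem pvCells_nodup (d : List String) : (pvCells d).Nodup := (pvFlat_aux d 0).1

theorem pvRow_eq (i : Int) (row : List Char) :
    (PySem.List.pyRange 0 (row.length : Int) 1).filterMap (fun j =>
      if PySem.List.pyGet? row j = some '@' then some (i, j) else none)
    = (PySem.List.enumerate row).filterMap (pvSel i) := by
  have he := PySem.List.enumerate_eq_map_pyRange row ' '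
  rw [he, List.filterMap_map]
  refine List.filterMap_congr ?_
  intro j hj
  have hj' := PySem.List.mem_pyRange_one.1 hj
  have h0 : j = ((j.toNat : Nat) : Int) := by omega
  have hlt : j.toNat < row.length := by omega
  rw [h0]
  simp only [Function.comp, pvSel, PySem.List.pyGet?_natCast, PySem.List.pyGetD_natCast,
    List.getD_eq_getElem?_getD, List.getElem?_eq_getElem hlt]
  simp

theorem pvPoints_eq (d : List String) (hrect : pvRect d) : pvPoints d = pvCells d := by
  have hflat : (PySem.List.enumerate d).flatMap (fun p =>
      (PySem.List.pyRange 0 (pvWidth d) 1).filterMap (fun j =>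
        if PySem.List.pyGet? p.2.toList j = some '@' then some (p.1, j) else none))
      = pvCells d := by
    unfold pvCells
    refine List.flatMap_congr ?_
    intro p hp
    rcases (PySem.List.mem_enumerate_iff _ _ _).1 hp with ⟨k, hk, rfl⟩
    have hmem : d[k] ∈ d := List.getElem_mem _
    obtain ⟨r, t, hd⟩ : ∃ r t, d = r :: t := by
      cases d with
      | nil => simp at hk
      | cons r t => exact ⟨r, t, rfl⟩
    have hr : r ∈ d := by rw [hd]; exact List.mem_cons_self
    have hwidth : pvWidth d = PySem.Str.len r := by rw [hd]; rfl
    have hw : pvWidth d = (((0 + (k : Int), d[k]).2.toList.length : Nat) : Int) := by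
      rw [hwidth, PySem.Str.len_eq]
      have := hrect r hr _ hmem
      simpa using this
    rw [hw, pvRow_eq]
  unfold pvPoints
  rw [hflat]
  exact PySem.Set.ofList_eq_self_of_nodup _ (pvCells_nodup d)

theorem pvMem_cells (d : List String) (x y : Int) :
    (x, y) ∈ pvCells d ↔ 0 ≤ x ∧ 0 ≤ y ∧ pvCharAt d x y = some '@' := by
  unfold pvCells pvCharAt pvSel
  constructor
  · intro h
    rcases List.mem_flatMap.1 h with ⟨p, hp, hmem⟩
    rcases (PySem.List.mem_enumerate_iff _ _ _).1 hp with ⟨k, hk, rfl⟩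
    rcases List.mem_filterMap.1 hmem with ⟨q, hq, hsel⟩
    rcases (PySem.List.mem_enumerate_iff _ _ _).1 hq with ⟨m, hm, rfl⟩
    by_cases hat : d[k].toList[m] = '@'
    · simp only [hat, if_pos] at hsel
      obtain ⟨hx, hy⟩ : (0 : Int) + ↑k = x ∧ (0 : Int) + ↑m = y := by
        constructor <;> [exact congrArg Prod.fst (Option.some.inj hsel);
                        exact congrArg Prod.snd (Option.some.inj hsel)]
      subst hx; subst hy
      refine ⟨by positivity, by positivity, ?_⟩
      rw [zero_add, zero_add, PySem.List.pyGet?_natCast, List.getElem?_eq_getElem hk]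
      simp only [Option.map_some, Option.bind_some, PySem.List.pyGet?_natCast]
      exact List.getElem?_eq_some_iff.2 ⟨by simpa using hm, hat⟩
    · simp [hat] at hsel
  · rintro ⟨hx, hy, hat⟩
    lift x to Nat using hx with k
    lift y to Nat using hy with m
    rw [PySem.List.pyGet?_natCast] at hat
    cases hdk : d[k]? with
    | none => simp [hdk] at hat
    | some row =>
      simp only [hdk, Option.map_some, Option.bind_some, PySem.List.pyGet?_natCast] at hat
      have hk : k < d.length := (List.getElem?_eq_some_iff.1 hdk).1
      have hm : m < row.toList.length := (List.getElem?_eq_some_iff.1 hat).1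
      refine List.mem_flatMap.2 ⟨((k : Int), row), ?_, ?_⟩
      · exact (PySem.List.mem_enumerate_iff _ _ _).2
          ⟨k, hk, by simp [(List.getElem?_eq_some_iff.1 hdk).2]⟩
      · refine List.mem_filterMap.2 ⟨((m : Int), row.toList[m]), ?_, ?_⟩
        · exact (PySem.List.mem_enumerate_iff _ _ _).2 ⟨m, hm, by simp⟩
        · have : row.toList[m] = '@' := (List.getElem?_eq_some_iff.1 hat).2
          simp [this]

theorem pvStep (g c : Prop) [Decidable g] [Decidable c] (b : Bool)
    (hb : b = true ↔ (¬ g ∧ c)) (a : Int) :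
    (if g then a else if c then a + 1 else a) = a + (if b then 1 else 0) := by
  by_cases hg : g <;> by_cases hc : c <;>
    simp [hg, hc] at hb ⊢ <;> simp [hb]

theorem pvCell_iff (d : List String) (hrect : pvRect d) (i j : Nat) (row : String)
    (hi : d[i]? = some row) (dx dy : Int) :
    PySem.Set.contains (pvCells d) ((i : Int) + dx, (j : Int) + dy) = true ↔
    (¬((i : Int) + dx > (d.length : Int) - 1 ∨ (i : Int) + dx < 0 ∨
       (j : Int) + dy > (row.toList.length : Int) - 1 ∨ (j : Int) + dy < 0) ∧
     pvCharAt d ((i : Int) + dx) ((j : Int) + dy) = some '@') := by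
  have hmem : PySem.Set.contains (pvCells d) ((i : Int) + dx, (j : Int) + dy) = true ↔
      ((i : Int) + dx, (j : Int) + dy) ∈ pvCells d := by
    simp [PySem.Set.contains]
  rw [hmem, pvMem_cells]
  constructor
  · rintro ⟨hx, hy, hat⟩
    have hxx : ∃ r', PySem.List.pyGet? d ((i:Int)+dx) = some r' ∧
        PySem.List.pyGet? r'.toList ((j:Int)+dy) = some '@' := by
      unfold pvCharAt at hat
      cases hg : PySem.List.pyGet? d ((i:Int)+dx) with
      | none => rw [hg] at hat; simp at hat
      | some r' => rw [hg] at hat; simp at hat; exact ⟨r', rfl, hat⟩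
    obtain ⟨r', hg, hc⟩ := hxx
    have hxn : (i:Int) + dx = ((((i:Int)+dx).toNat : Nat) : Int) := by omega
    have hyn : (j:Int) + dy = ((((j:Int)+dy).toNat : Nat) : Int) := by omega
    rw [hxn, PySem.List.pyGet?_natCast] at hg
    rw [hyn, PySem.List.pyGet?_natCast] at hc
    have hxl : ((i:Int)+dx).toNat < d.length := (List.getElem?_eq_some_iff.1 hg).1
    have hyl : ((j:Int)+dy).toNat < r'.toList.length := (List.getElem?_eq_some_iff.1 hc).1
    have hr'mem : r' ∈ d := by
      have := (List.getElem?_eq_some_iff.1 hg).2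
      exact this ▸ List.getElem_mem _
    have hrowmem : row ∈ d := by
      have := (List.getElem?_eq_some_iff.1 hi).2
      exact this ▸ List.getElem_mem _
    have := hrect r' hr'mem row hrowmem
    unfold pvCharAt at hat
    refine ⟨by omega, hat⟩
  · rintro ⟨hb, hat⟩
    push_neg at hb
    exact ⟨by omega, by omega, hat⟩

def pvG (d : List String) (L x y a : Int) : Int :=
  if x > (d.length : Int) - 1 ∨ x < 0 ∨ y > L - 1 ∨ y < 0 then a
  else if pvCharAt d x y = some '@' then a + 1 else a

theorem pvAdj_unfold (d : List String) (L ri ci : Int) : pvAdj d L ri ci =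
    pvG d L (ri + 1) (ci + 1) (pvG d L (ri + 1) (ci + 0) (pvG d L (ri + 1) (ci + -1)
      (pvG d L (ri + 0) (ci + 1) (pvG d L (ri + 0) (ci + -1)
      (pvG d L (ri + -1) (ci + 1) (pvG d L (ri + -1) (ci + 0)
      (pvG d L (ri + -1) (ci + -1) 0))))))) := rfl

def pvE (pts : List (Int × Int)) (x y : Int) : Int :=
  if PySem.Set.contains pts (x, y) then 1 else 0

theorem pvNb_unfold (pts : List (Int × Int)) (p : Int × Int) : pvNb pts p =
    pvE pts (p.1 + -1) (p.2 + -1) + (pvE pts (p.1 + -1) (p.2 + 0) + (pvE pts (p.1 + -1) (p.2 + 1) +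
    (pvE pts (p.1 + 0) (p.2 + -1) + (pvE pts (p.1 + 0) (p.2 + 1) +
    (pvE pts (p.1 + 1) (p.2 + -1) + (pvE pts (p.1 + 1) (p.2 + 0) +
    (pvE pts (p.1 + 1) (p.2 + 1) + 0))))))) := rfl

theorem pvG_eq (d : List String) (L x y : Int) (b : Bool)
    (hb : b = true ↔ (¬(x > (d.length : Int) - 1 ∨ x < 0 ∨ y > L - 1 ∨ y < 0) ∧
      pvCharAt d x y = some '@')) (a : Int) :
    pvG d L x y a = a + (if b then 1 else 0) := by
  unfold pvG
  exact pvStep _ _ _ hb a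

theorem pvAdj_eq_nb (d : List String) (hrect : pvRect d) (i j : Nat)
    (row : String) (hi : d[i]? = some row) :
    pvAdj d (PySem.Str.len row) (i : Int) (j : Int) = pvNb (pvCells d) ((i : Int), (j : Int)) := by
  have h := pvCell_iff d hrect i j row hi
  rw [PySem.Str.len_eq, pvAdj_unfold, pvNb_unfold]
  rw [pvG_eq _ _ _ _ _ (h 1 1), pvG_eq _ _ _ _ _ (h 1 0), pvG_eq _ _ _ _ _ (h 1 (-1)),
      pvG_eq _ _ _ _ _ (h 0 1), pvG_eq _ _ _ _ _ (h 0 (-1)),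
      pvG_eq _ _ _ _ _ (h (-1) 1), pvG_eq _ _ _ _ _ (h (-1) 0), pvG_eq _ _ _ _ _ (h (-1) (-1))]
  unfold pvE
  ring

theorem pvFoldl_pair_if {α β : Type} (l : List α) (P : α → Prop) [DecidablePred P]
    (f : α → β) (acc : Int × List β) :
    l.foldl (fun a x => if P x then (a.1 + 1, a.2 ++ [f x]) else a) acc
    = (acc.1 + (((l.filter (fun x => decide (P x))).map f).length : Int),
       acc.2 ++ (l.filter (fun x => decide (P x))).map f) := by
  induction l generalizing acc with
  | nil => simp
  | cons x t ih =>
    by_cases h : P x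
    · simp only [List.foldl_cons, if_pos h, ih]
      refine Prod.ext ?_ ?_
      · simp [h]; push_cast; ring
      · simp [h]
    · simp [List.foldl_cons, h, ih]

theorem pvFoldl_pair_outer {α β : Type} (l : List α) (g : α → List β) (acc : Int × List β) :
    l.foldl (fun a x => (a.1 + ((g x).length : Int), a.2 ++ g x)) acc
    = (acc.1 + ((l.flatMap g).length : Int), acc.2 ++ l.flatMap g) := by
  induction l generalizing acc with
  | nil => simp
  | cons x t ih =>
    simp only [List.foldl_cons, ih, List.flatMap_cons, List.length_append, List.append_assoc]
    refine Prod.ext ?_ ?_ <;> simp <;> push_cast <;> ring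

theorem pvFilterMap_sel (i : Int) (row : List Char) : ∀ (s : Int),
    (PySem.List.enumerate row s).filterMap (pvSel i)
    = ((PySem.List.enumerate row s).filter (fun q => decide (q.2 = '@'))).map
        (fun q => (i, q.1)) := by
  induction row with
  | nil => intro s; simp [PySem.List.enumerate]
  | cons c t ih =>
    intro s
    rw [PySem.List.enumerate_cons]
    by_cases h : c = '@'
    · rw [List.filterMap_cons_some (show pvSel i (s, c) = some (i, s) by simp [pvSel, h]), ih (s + 1)]
      simp [h]
    · rw [List.filterMap_cons_none (show pvSel i (s, c) = none by simp [pvSel, h]), ih (s + 1)]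
      simp [h]

theorem pvLocs_eq (d : List String) (hrect : pvRect d) :
    (PySem.List.enumerate d).flatMap (fun p =>
      ((PySem.List.enumerate p.2.toList).filter (fun q =>
        decide (pvAdj d (PySem.Str.len p.2) p.1 q.1 < 4 ∧
          PySem.List.pyGet? p.2.toList q.1 = some '@'))).map (fun q => (p.1, q.1)))
    = (pvCells d).filter (fun p => pvNb (pvCells d) p < 4) := by
  have hc : pvCells d = (PySem.List.enumerate d).flatMap (fun p =>
    (PySem.List.enumerate p.2.toList).filterMap (pvSel p.1)) := rfl
  conv_rhs => rw [hc]
  rw [List.filter_flatMap]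
  refine List.flatMap_congr ?_
  intro p hp
  rcases (PySem.List.mem_enumerate_iff _ _ _).1 hp with ⟨k, hk, rfl⟩
  rw [pvFilterMap_sel, List.filter_map, List.filter_filter]
  refine congrArg _ (List.filter_congr ?_)
  intro q hq
  rcases (PySem.List.mem_enumerate_iff _ _ _).1 hq with ⟨m, hm, rfl⟩
  simp only [zero_add] at *
  have hm' : m < (d[k]).toList.length := by simpa using hm
  have hpy : PySem.List.pyGet? (d[k]).toList ((m : Nat) : Int) = some ((d[k]).toList[m]) := by
    rw [PySem.List.pyGet?_natCast]; exact List.getElem?_eq_getElem hm'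
  have hadj := pvAdj_eq_nb d hrect k m (d[k]) (List.getElem?_eq_getElem hk)
  simp only [hpy, hadj]
  simp [← hc]

theorem pvGap_eq (d : List String) (hrect : pvRect d) :
    pvGap d = ((((pvCells d).filter (fun p => pvNb (pvCells d) p < 4)).length : Int),
               (pvCells d).filter (fun p => pvNb (pvCells d) p < 4)) := by
  unfold pvGap
  have hstep := PySem.List.foldl_congr_mem (PySem.List.enumerate d)
    (fun (acc : Int × List (Int × Int)) (p : Int × String) =>
      (PySem.List.enumerate p.2.toList).foldl (fun acc2 q =>
        if pvAdj d (PySem.Str.len p.2) p.1 q.1 < 4 ∧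
           PySem.List.pyGet? p.2.toList q.1 = some '@'
        then (acc2.1 + 1, acc2.2 ++ [(p.1, q.1)])
        else acc2) acc)
    (fun (a : Int × List (Int × Int)) (p : Int × String) =>
      (a.1 + ((((PySem.List.enumerate p.2.toList).filter (fun q =>
          decide (pvAdj d (PySem.Str.len p.2) p.1 q.1 < 4 ∧
            PySem.List.pyGet? p.2.toList q.1 = some '@'))).map (fun q => (p.1, q.1))).length : Int),
       a.2 ++ ((PySem.List.enumerate p.2.toList).filter (fun q =>
          decide (pvAdj d (PySem.Str.len p.2) p.1 q.1 < 4 ∧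
            PySem.List.pyGet? p.2.toList q.1 = some '@'))).map (fun q => (p.1, q.1))))
    ((0 : Int), ([] : List (Int × Int)))
    (fun acc x _ => pvFoldl_pair_if _ _ _ acc)
  rw [hstep, pvFoldl_pair_outer, pvLocs_eq d hrect]
  simp

-- the row rebuilt by remove_locations' repeated slice-splicing, as a recursion
def pvRm (locs : List (Int × Int)) (i : Int) : List Char → Int → List Char
  | [], _ => []
  | c :: t, s => (if (i, s) ∈ locs then '.' else c) :: pvRm locs i t (s + 1)

theorem pvRm_length (locs : List (Int × Int)) (i : Int) (xs : List Char) : ∀ s,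
    (pvRm locs i xs s).length = xs.length := by
  induction xs with
  | nil => intro s; rfl
  | cons c t ih => intro s; simp [pvRm, ih (s + 1)]

theorem pvFoldSet (locs : List (Int × Int)) (i : Int) (xs : List Char) :
    ∀ (n : Nat) (pre : List Char), pre.length = n →
    (PySem.List.enumerate xs (n : Int)).foldl (fun nr q =>
      if (i, q.1) ∈ locs
      then PySem.List.slice nr none (some q.1) ++ ['.'] ++
           PySem.List.slice nr (some (q.1 + 1)) none
      else nr) (pre ++ xs)
    = pre ++ pvRm locs i xs (n : Int) := by
  induction xs with
  | nil => intro n pre h; simp [PySem.List.enumerate, pvRm]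
  | cons c t ih =>
    intro n pre h
    rw [PySem.List.enumerate_cons, List.foldl_cons]
    have hcast : ((n : Int) + 1) = ((n + 1 : Nat) : Int) := by push_cast; ring
    have hrm : pvRm locs i (c :: t) (n : Int)
        = (if (i, (n : Int)) ∈ locs then '.' else c) :: pvRm locs i t ((n : Int) + 1) := rfl
    by_cases hl : (i, (n : Int)) ∈ locs
    · rw [if_pos hl]
      have hsl : PySem.List.slice (pre ++ c :: t) none (some (n : Int)) ++ ['.'] ++
          PySem.List.slice (pre ++ c :: t) (some ((n : Int) + 1)) none
          = (pre ++ ['.']) ++ t := by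
        rw [PySem.List.slice_to_natCast, hcast, PySem.List.slice_from_natCast,
            List.take_left' h,
            show pre ++ c :: t = (pre ++ [c]) ++ t by simp,
            List.drop_left' (by simp [h])]
      rw [hsl, hcast, ih (n + 1) (pre ++ ['.']) (by simp [h]), hrm, if_pos hl, ← hcast]
      simp
    · rw [if_neg hl,
          show pre ++ c :: t = (pre ++ [c]) ++ t by simp,
          hcast, ih (n + 1) (pre ++ [c]) (by simp [h]), hrm, if_neg hl, ← hcast]
      simp

theorem pvFoldSet0 (locs : List (Int × Int)) (i : Int) (xs : List Char) :
    (PySem.List.enumerate xs).foldl (fun nr q =>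
      if (i, q.1) ∈ locs
      then PySem.List.slice nr none (some q.1) ++ ['.'] ++
           PySem.List.slice nr (some (q.1 + 1)) none
      else nr) xs = pvRm locs i xs 0 := by
  simpa using pvFoldSet locs i xs 0 [] rfl

theorem pvRemove_eq (d : List String) (locs : List (Int × Int)) :
    pvRemove d locs = (PySem.List.enumerate d).map (fun p =>
      String.ofList (pvRm locs p.1 p.2.toList 0)) := by
  unfold pvRemove
  have hstep := PySem.List.foldl_congr_mem (PySem.List.enumerate d)
    (fun (nd : List String) (p : Int × String) =>
      nd ++ [String.ofList ((PySem.List.enumerate p.2.toList).foldl (fun nr q =>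
        if (p.1, q.1) ∈ locs
        then PySem.List.slice nr none (some q.1) ++ ['.'] ++
             PySem.List.slice nr (some (q.1 + 1)) none
        else nr) p.2.toList)])
    (fun (nd : List String) (p : Int × String) =>
      nd ++ [String.ofList (pvRm locs p.1 p.2.toList 0)])
    []
    (by
      intro acc p _
      beta_reduce
      rw [pvFoldSet0 locs p.1 p.2.toList])
  rw [hstep, PySem.List.foldl_append_singleton_eq_map]
  simp

theorem pvEnum_map {α β : Type} (l : List α) (F : Int × α → β) : ∀ (s : Int),
    PySem.List.enumerate ((PySem.List.enumerate l s).map F) s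
    = (PySem.List.enumerate l s).map (fun p => (p.1, F p)) := by
  induction l with
  | nil => intro s; simp [PySem.List.enumerate]
  | cons c t ih => intro s; simp [PySem.List.enumerate_cons, ih (s + 1)]

theorem pvRm_cells (locs : List (Int × Int)) (i : Int) (xs : List Char) : ∀ (s : Int),
    (PySem.List.enumerate (pvRm locs i xs s) s).filterMap (pvSel i)
    = ((PySem.List.enumerate xs s).filterMap (pvSel i)).filter (fun p => p ∉ locs) := by
  induction xs with
  | nil => intro s; simp [pvRm, PySem.List.enumerate]
  | cons c t ih =>
    intro s
    simp only [pvRm]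
    rw [PySem.List.enumerate_cons, PySem.List.enumerate_cons]
    by_cases hl : (i, s) ∈ locs
    · rw [if_pos hl]
      rw [List.filterMap_cons_none (show pvSel i (s, '.') = none by simp [pvSel])]
      by_cases hc : c = '@'
      · rw [List.filterMap_cons_some (show pvSel i (s, c) = some (i, s) by simp [pvSel, hc])]
        rw [List.filter_cons_of_neg (by simp [hl])]
        exact ih (s + 1)
      · rw [List.filterMap_cons_none (show pvSel i (s, c) = none by simp [pvSel, hc])]
        exact ih (s + 1)
    · rw [if_neg hl]
      by_cases hc : c = '@'
      · rw [List.filterMap_cons_some (show pvSel i (s, c) = some (i, s) by simp [pvSel, hc]),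
            List.filterMap_cons_some (show pvSel i (s, c) = some (i, s) by simp [pvSel, hc])]
        rw [List.filter_cons_of_pos (by simp [hl])]
        rw [ih (s + 1)]
      · rw [List.filterMap_cons_none (show pvSel i (s, c) = none by simp [pvSel, hc]),
            List.filterMap_cons_none (show pvSel i (s, c) = none by simp [pvSel, hc])]
        exact ih (s + 1)

theorem pvRemove_cells (d : List String) (locs : List (Int × Int)) :
    pvCells (pvRemove d locs) = (pvCells d).filter (fun p => p ∉ locs) := by
  unfold pvCells
  rw [pvRemove_eq, pvEnum_map, List.flatMap_map, List.filter_flatMap]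
  refine List.flatMap_congr ?_
  intro p hp
  simp only [String.toList_ofList]
  exact pvRm_cells locs p.1 p.2.toList 0

theorem pvRemove_rect (d : List String) (locs : List (Int × Int)) (hrect : pvRect d) :
    pvRect (pvRemove d locs) := by
  rw [pvRemove_eq]
  intro r hr s hs
  rcases List.mem_map.1 hr with ⟨p, hp, rfl⟩
  rcases List.mem_map.1 hs with ⟨q, hq, rfl⟩
  rcases (PySem.List.mem_enumerate_iff _ _ _).1 hp with ⟨k, hk, rfl⟩
  rcases (PySem.List.mem_enumerate_iff _ _ _).1 hq with ⟨m, hm, rfl⟩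
  simp only [String.toList_ofList, pvRm_length]
  exact hrect _ (List.getElem_mem _) _ (List.getElem_mem _)

theorem pvDiff_eq (pts L : List (Int × Int)) :
    PySem.Set.diff pts L = pts.filter (fun p => p ∉ L) := by
  refine List.filter_congr ?_
  intro x _
  simp [PySem.Set.contains]

theorem pvSim (fuel : Nat) : ∀ (d : List String) (total : Int), pvRect d →
    pvLoopA fuel d total = pvLoopB fuel (pvCells d) total := by
  induction fuel with
  | zero => intro d total _; rfl
  | succ f ih =>
    intro d total hrect
    have hA : pvLoopA (f + 1) d total =
        (if (pvGap d).1 = 0 then total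
         else pvLoopA f (pvRemove d (pvGap d).2) (total + (pvGap d).1)) := rfl
    have hB : pvLoopB (f + 1) (pvCells d) total =
        (if (pvCells d).filter (fun p => pvNb (pvCells d) p < 4) = [] then total
         else pvLoopB f (PySem.Set.diff (pvCells d)
            ((pvCells d).filter (fun p => pvNb (pvCells d) p < 4)))
            (total + ((pvCells d).filter (fun p => pvNb (pvCells d) p < 4)).length)) := rfl
    rw [hA, hB, pvGap_eq d hrect]
    by_cases hL : (pvCells d).filter (fun p => pvNb (pvCells d) p < 4) = []
    · rw [if_pos hL]
      simp [hL]
    · rw [if_neg hL, if_neg (by simpa using hL)]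
      rw [ih (pvRemove d _) _ (pvRemove_rect d _ hrect), pvRemove_cells, pvDiff_eq]

-- ===== VERDICT (by name: the statement is the Claim_ definition above) =====
theorem get_accessable_paper_p2_spec : Claim_equal_get_accessable_paper_p2 := by
  intro d _ hpre
  have hrect : pvRect d := by
    intro r hr s hs
    have := hpre r hr s hs
    simpa [PySem.Str.len] using this
  unfold Spec_get_accessable_paper_p2 get_accessable_paper_p2 get_accessable_paper_p2_alt
  rw [pvPoints_eq d hrect]
  exact pvSim _ d 0 hrect
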